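-- pv_equiv track=rewrite | github.com/OpenVQE/OpenVQE | python/QUCC_active_space/qubit_pool.py | single_position_generator
-- ===== SOURCE A (Python) =====
-- import itertools
--
-- def single_position_generator(nos_qubits):
--     store = []
--     x = [i for i in range(nos_qubits)]
--     ls = list(itertools.permutations(x, 2))
--     for p in range(len(ls)):
--         i, k = ls[p]
--         if i < k:
--             store.append(ls[p])
--     return store
-- ===== SOURCE B (Python) =====
-- def single_position_generator(nos_qubits):
--     store = []
--     for i in range(nos_qubits):
--         for k in range(i + 1, nos_qubits):
--             store.append((i, k))
--     return store
-- ===== Notes on version B (the rewrite author's own statement) =====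
-- stated objective: faster
-- what changed: B replaces materializing all n(n-1) ordered permutations with itertools and filtering them by i<k with a direct nested range loop that enumerates only the i<k pairs.
import Mathlib
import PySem

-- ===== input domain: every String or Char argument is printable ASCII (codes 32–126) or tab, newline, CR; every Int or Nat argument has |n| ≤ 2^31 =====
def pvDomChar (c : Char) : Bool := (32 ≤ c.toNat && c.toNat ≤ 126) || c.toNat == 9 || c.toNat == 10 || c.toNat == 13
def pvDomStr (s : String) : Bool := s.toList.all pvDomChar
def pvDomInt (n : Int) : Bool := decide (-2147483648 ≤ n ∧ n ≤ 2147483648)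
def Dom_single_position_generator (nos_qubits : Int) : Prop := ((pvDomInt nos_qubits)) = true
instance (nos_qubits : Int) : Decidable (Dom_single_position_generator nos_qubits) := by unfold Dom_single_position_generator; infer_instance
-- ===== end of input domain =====

-- B replaces A's generate-all-permutations-then-filter with a direct nested range loop over only the i<k pairs (simpler; fewer pairs built, no filter pass).

-- ===== PORT A =====
def single_position_generator (nos_qubits : Int) : List (Int × Int) :=
  let x := PySem.List.pyRange 0 nos_qubits 1
  let ls := PySem.List.permutations x 2
  -- 'for p in range(len(ls)): i, k = ls[p]': every element of ls has length 2, so the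
  -- unpacking is indexing positions 0 and 1 (exact; the default 0 is never used)
  ls.foldl (fun store p =>
    let i := PySem.List.pyGetD p 0 0
    let k := PySem.List.pyGetD p 1 0
    if i < k then store ++ [(i, k)] else store) []

-- ===== PORT B =====
def single_position_generator_alt (nos_qubits : Int) : List (Int × Int) :=
  (PySem.List.pyRange 0 nos_qubits 1).foldl (fun store i =>
    (PySem.List.pyRange (i + 1) nos_qubits 1).foldl (fun s k => s ++ [(i, k)]) store) []

-- ===== PRECONDITION & SPEC =====
def Spec_single_position_generator (nos_qubits : Int) (out : List (Int × Int)) : Prop := out = single_position_generator_alt nos_qubits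
instance (nos_qubits : Int) (out : List (Int × Int)) : Decidable (Spec_single_position_generator nos_qubits out) := by unfold Spec_single_position_generator; infer_instance

-- ===== CLAIM (what is proved, stated in full; the proofs are below) =====
def Claim_equal_single_position_generator : Prop := ∀ (nos_qubits : Int), Dom_single_position_generator nos_qubits → Spec_single_position_generator nos_qubits (single_position_generator nos_qubits)

-- ===== LEMMAS AND PROOFS =====

-- the common closed shape: ordered pairs (head, later element), structurally on the list
def pvPairs : List Int → List (Int × Int)
  | [] => []
  | a :: t => t.map (fun k => (a, k)) ++ pvPairs t

-- A-side abbreviations used only in the proofs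
def pvF (p : List Int) : Int × Int := (PySem.List.pyGetD p 0 0, PySem.List.pyGetD p 1 0)
def pvPred (p : List Int) : Bool := PySem.List.pyGetD p 0 0 < PySem.List.pyGetD p 1 0

lemma perm_succ (xs : List Int) (r : Nat) : PySem.List.permutations xs (r+1) =
    (List.range xs.length).flatMap (fun i => match xs[i]? with
      | none => []
      | some v => (PySem.List.permutations (xs.eraseIdx i) r).map (fun p => v :: p)) := by
  simp only [PySem.List.permutations]
  exact List.flatMap_congr (fun i _ => by cases xs[i]? <;> rfl)

lemma perm_one (xs : List Int) : PySem.List.permutations xs 1 = xs.map (fun v => [v]) := by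
  induction xs with
  | nil => rw [perm_succ]; simp
  | cons a t ih =>
    rw [perm_succ] at ih ⊢
    simp only [List.length_cons, List.range_succ_eq_map, List.flatMap_cons, List.flatMap_map,
      List.getElem?_cons_zero, List.getElem?_cons_succ, Nat.succ_eq_add_one,
      PySem.List.permutations_zero, List.map_cons, List.map_nil] at ih ⊢
    rw [← ih]
    rfl

lemma perm_two (xs : List Int) : PySem.List.permutations xs 2 =
    (List.range xs.length).flatMap (fun i => match xs[i]? with
      | none => []
      | some v => (xs.eraseIdx i).map (fun y => [v, y])) := by
  rw [perm_succ]
  apply List.flatMap_congr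
  intro i _
  rcases xs[i]? with _ | v
  · simp
  · simp [perm_one, List.map_map, Function.comp]

-- the filtered, projected permutation list collapses to pvPairs on a strictly increasing list
lemma mfp (xs : List Int) (hs : xs.Pairwise (· < ·)) :
    ((PySem.List.permutations xs 2).filter pvPred).map pvF = pvPairs xs := by
  induction xs with
  | nil => simp [pvPairs, PySem.List.permutations]
  | cons a t ih =>
    have ha : ∀ y ∈ t, a < y := fun y hy => (List.pairwise_cons.1 hs).1 y hy
    have ht : t.Pairwise (· < ·) := (List.pairwise_cons.1 hs).2
    rw [perm_two]
    simp only [List.length_cons, List.range_succ_eq_map, List.flatMap_cons, List.flatMap_map]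
    simp only [List.getElem?_cons_zero, List.getElem?_cons_succ, Nat.succ_eq_add_one,
      List.eraseIdx_cons_zero, List.eraseIdx_cons_succ]
    rw [List.filter_append, List.map_append, pvPairs]
    congr 1
    · -- head block: every [a, y] with y ∈ t passes the filter
      have : List.filter pvPred (t.map (fun y => [a, y])) = t.map (fun y => [a, y]) := by
        rw [List.filter_eq_self]
        intro p hp
        rcases List.mem_map.1 hp with ⟨y, hy, rfl⟩
        simpa [pvPred, PySem.List.pyGetD] using ha y hy
      rw [this, List.map_map]
      apply List.map_congr_left
      intro y _
      simp [pvF, PySem.List.pyGetD]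
    · -- tail blocks: [t[j], a] is filtered out, the rest is the tail's own permutation list
      rw [← ih ht, perm_two, List.filter_flatMap, List.map_flatMap,
          List.filter_flatMap, List.map_flatMap]
      apply List.flatMap_congr
      intro j hj
      rcases h : t[j]? with _ | v
      · simp
      · have hv : v ∈ t := List.mem_of_getElem? h
        have hav : ¬ (v < a) := not_lt.2 (le_of_lt (ha v hv))
        simp only [List.map_cons, List.filter_cons]
        have : pvPred [v, a] = false := by
          simp [pvPred, PySem.List.pyGetD]
          omega
        rw [this]
        simp

-- B's inner loop appends the mapped inner range
lemma alt_inner (a b : Int) (store : List (Int × Int)) (i : Int) :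
    (PySem.List.pyRange a b 1).foldl (fun s k => s ++ [(i, k)]) store
      = store ++ (PySem.List.pyRange a b 1).map (fun k => (i, k)) :=
  PySem.List.foldl_append_singleton_eq_map _ _ _

-- B's outer loop builds pvPairs of the range
lemma alt_outer (n : Int) : ∀ (a : Int) (acc : List (Int × Int)),
    (PySem.List.pyRange a n 1).foldl (fun store i =>
        (PySem.List.pyRange (i + 1) n 1).foldl (fun s k => s ++ [(i, k)]) store) acc
      = acc ++ pvPairs (PySem.List.pyRange a n 1) := by
  intro a
  by_cases h : a < n
  · intro acc
    rw [PySem.List.pyRange_one_cons h, List.foldl_cons, alt_inner]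
    have := alt_outer n (a + 1) (acc ++ (PySem.List.pyRange (a+1) n 1).map (fun k => (a, k)))
    rw [this, pvPairs, List.append_assoc]
  · intro acc
    rw [PySem.List.pyRange_one_eq_nil (not_lt.1 h)]
    simp [pvPairs]
  termination_by a => (n - a).toNat
  decreasing_by omega

-- ===== VERDICT (by name: the statement is the Claim_ definition above) =====
theorem single_position_generator_spec : Claim_equal_single_position_generator := by
  intro n _
  unfold Spec_single_position_generator single_position_generator single_position_generator_alt
  rw [alt_outer, List.nil_append]
  have hA : (PySem.List.permutations (PySem.List.pyRange 0 n 1) 2).foldl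
      (fun store p => if PySem.List.pyGetD p 0 0 < PySem.List.pyGetD p 1 0
        then store ++ [(PySem.List.pyGetD p 0 0, PySem.List.pyGetD p 1 0)] else store) []
      = pvPairs (PySem.List.pyRange 0 n 1) := by
    have := PySem.List.foldl_append_if pvPred pvF (PySem.List.permutations (PySem.List.pyRange 0 n 1) 2) []
    simp only [pvPred, pvF, decide_eq_true_eq] at this
    rw [this, List.nil_append]
    exact mfp _ (PySem.List.pairwise_lt_pyRange_one 0 n)
  simpa using hA
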